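-- pv_equiv track=rewrite | github.com/martinLucidarme/CoordinateProject | idea2_coordinates.py | string_coord
-- ===== SOURCE A (Python) =====
-- def string_coord(list_of_list):
--     strcord = ''
--     n = len(list_of_list[0])
--     j=0
--     for x in range(n):
--         while j< len(list_of_list):
--             strcord+= f'{list_of_list[j][x]}'+'    '
--             j+=1
--         j=0
--         strcord += '\n'
--     return strcord
-- ===== SOURCE B (Python) =====
-- def string_coord(list_of_list):
--     n = len(list_of_list[0])
--     bufs = [''] * n
--     for row in list_of_list:
--         bufs = [bufs[x] + f'{row[x]}    ' for x in range(n)]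
--     return ''.join(buf + '\n' for buf in bufs)
-- ===== Notes on version B (the rewrite author's own statement) =====
-- stated objective: alternative
-- what changed: B interchanges the loop nesting: instead of A's column-major scan that re-traverses the whole list for each column while growing one string, B makes a single row-major pass maintaining one accumulator string per output line and joins them at the end.
import Mathlib
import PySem

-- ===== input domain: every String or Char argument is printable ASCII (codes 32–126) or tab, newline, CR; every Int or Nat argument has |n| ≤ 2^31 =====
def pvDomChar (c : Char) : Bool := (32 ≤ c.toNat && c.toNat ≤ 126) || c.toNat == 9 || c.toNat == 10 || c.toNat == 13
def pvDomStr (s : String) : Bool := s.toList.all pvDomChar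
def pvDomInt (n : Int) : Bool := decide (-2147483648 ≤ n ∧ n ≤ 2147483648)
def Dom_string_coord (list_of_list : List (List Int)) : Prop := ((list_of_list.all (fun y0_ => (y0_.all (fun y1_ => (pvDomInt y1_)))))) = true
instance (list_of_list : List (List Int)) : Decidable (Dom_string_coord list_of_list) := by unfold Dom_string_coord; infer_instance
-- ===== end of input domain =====

-- B interchanges the loops: it keeps one accumulator string per output line and makes a
-- single row-major pass, instead of A's column-major rescans of the whole list; objective: alternative decomposition.

-- shared helper: the Python f-string cell `f'{row[x]}'` (Python raises when x is out of range; Pre_ excludes that)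
def pvCell (row : List Int) (x : Nat) : String :=
  PySem.Int.toStr ((PySem.List.pyGet? row (x : Int)).getD 0)

-- ===== PORT A =====
def string_coord (list_of_list : List (List Int)) : String :=
  let n := (list_of_list.headD []).length
  (List.range n).foldl
    (fun strcord x =>
      (list_of_list.foldl (fun s row => s ++ pvCell row x ++ "    ") strcord) ++ "\n")
    ""

-- ===== PORT B =====
def string_coord_alt (list_of_list : List (List Int)) : String :=
  let n := (list_of_list.headD []).length
  let bufs := list_of_list.foldl
    (fun (bufs : List String) row =>
      (List.range n).map (fun x => bufs.getD x "" ++ pvCell row x ++ "    "))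
    (List.replicate n "")
  -- ''.join(buf + '\n' for buf in bufs), ported by hand as a left fold (exact for empty separator)
  (bufs.map (fun b => b ++ "\n")).foldl (· ++ ·) ""

-- ===== PRECONDITION & SPEC =====
-- Pre_ excludes exactly the inputs where Python A raises IndexError: the empty list
-- (list_of_list[0]) and ragged inputs with a row shorter than the first row (list_of_list[j][x]).
def Pre_string_coord (list_of_list : List (List Int)) : Prop :=
  list_of_list ≠ [] ∧ ∀ row ∈ list_of_list, (list_of_list.headD []).length ≤ row.length
instance (list_of_list : List (List Int)) : Decidable (Pre_string_coord list_of_list) := by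
  unfold Pre_string_coord; infer_instance

def pvWitness_string_coord : List (List Int) := [[1, 2], [3, 4]]

def Spec_string_coord (list_of_list : List (List Int)) (out : String) : Prop := out = string_coord_alt list_of_list
instance (list_of_list : List (List Int)) (out : String) : Decidable (Spec_string_coord list_of_list out) := by unfold Spec_string_coord; infer_instance

-- ===== CLAIM (what is proved, stated in full; the proofs are below) =====
def Claim_equal_string_coord : Prop := ∀ (list_of_list : List (List Int)), Dom_string_coord list_of_list → Pre_string_coord list_of_list → Spec_string_coord list_of_list (string_coord list_of_list)

-- ===== LEMMAS AND PROOFS =====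

-- the string a column x contributes (A's inner while-loop run from the empty string)
def pvColStr (l : List (List Int)) (x : Nat) : String :=
  l.foldl (fun s row => s ++ pvCell row x ++ "    ") ""

theorem pvFoldl_app2 {α : Type} (f g : α → String) :
    ∀ (l : List α) (s : String),
      l.foldl (fun a r => a ++ f r ++ g r) s = s ++ l.foldl (fun a r => a ++ f r ++ g r) "" := by
  intro l
  induction l with
  | nil => intro s; simp
  | cons r t ih =>
    intro s
    simp only [List.foldl_cons]
    rw [ih (s ++ f r ++ g r), ih ("" ++ f r ++ g r)]
    simp [String.append_assoc]

theorem pvColStr_cons (row : List Int) (t : List (List Int)) (x : Nat) :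
    pvColStr (row :: t) x = pvCell row x ++ "    " ++ pvColStr t x := by
  unfold pvColStr
  simp only [List.foldl_cons]
  rw [pvFoldl_app2 (fun r => pvCell r x) (fun _ => "    ")]
  simp

theorem pvFoldB (n : Nat) :
    ∀ (l : List (List Int)) (g : Nat → String),
      l.foldl (fun (bufs : List String) row =>
          (List.range n).map (fun x => bufs.getD x "" ++ pvCell row x ++ "    "))
        ((List.range n).map g)
      = (List.range n).map (fun x => g x ++ pvColStr l x) := by
  intro l
  induction l with
  | nil => intro g; simp [pvColStr]
  | cons row t ih =>
    intro g
    simp only [List.foldl_cons]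
    have hstep : (List.range n).map
          (fun x => ((List.range n).map g).getD x "" ++ pvCell row x ++ "    ")
        = (List.range n).map (fun x => g x ++ pvCell row x ++ "    ") := by
      apply List.map_congr_left
      intro x hx
      have hx' : x < n := List.mem_range.mp hx
      rw [List.getD_eq_getElem?_getD]
      simp [hx']
    rw [hstep, ih (fun x => g x ++ pvCell row x ++ "    ")]
    apply List.map_congr_left
    intro x _
    rw [pvColStr_cons]
    simp [String.append_assoc]

theorem pv_total_eq (l : List (List Int)) : string_coord l = string_coord_alt l := by
  show (List.range (l.headD []).length).foldl
      (fun strcord x => (l.foldl (fun s row => s ++ pvCell row x ++ "    ") strcord) ++ "\n") ""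
    = ((l.foldl (fun (bufs : List String) row =>
          (List.range (l.headD []).length).map (fun x => bufs.getD x "" ++ pvCell row x ++ "    "))
        (List.replicate (l.headD []).length "")).map (fun b => b ++ "\n")).foldl (· ++ ·) ""
  have hrepl : (List.replicate (l.headD []).length "")
      = (List.range (l.headD []).length).map (fun _ => "") := by
    simp [List.map_const']
  rw [hrepl, pvFoldB]
  rw [List.map_map, List.foldl_map]
  have hA : ∀ (r : List Nat) (s : String),
      r.foldl (fun strcord x =>
          (l.foldl (fun a row => a ++ pvCell row x ++ "    ") strcord) ++ "\n") s
      = r.foldl (fun strcord x =>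
          strcord ++ (((fun x => "" ++ pvColStr l x) ∘ fun x => x) x ++ "\n")) s := by
    intro r
    induction r with
    | nil => intro s; simp
    | cons x t iht =>
      intro s
      simp only [List.foldl_cons]
      rw [iht]
      have : l.foldl (fun a row => a ++ pvCell row x ++ "    ") s = s ++ pvColStr l x := by
        rw [pvFoldl_app2 (fun r => pvCell r x) (fun _ => "    ")]
        rfl
      rw [this]
      simp [String.append_assoc]
  exact hA (List.range (l.headD []).length) ""

-- ===== VERDICT (by name: the statement is the Claim_ definition above) =====
theorem string_coord_spec : Claim_equal_string_coord := by
  intro l _ _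
  unfold Spec_string_coord
  exact pv_total_eq l
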